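-- pv_equiv track=rewrite | github.com/RafailTn/msc-thesis | src/intarna_fe.py | get_paired_bases_with_positions
-- ===== SOURCE A (Python) =====
-- def get_paired_bases_with_positions(total_vec, mre_binding_seq, mirna_binding_seq,
--                                      mre_binding_start, mirna_binding_start):
--     """
--     Extract paired bases and track positions in the FULL sequences.
--
--     Returns:
--         tuple: (paired_mre_str, paired_mir_str, mirna_positions_in_full_seq)
--     """
--     paired_mre, paired_mir, mirna_positions_in_full = [], [], []
--     mre_ptr = 0
--     mir_ptr = 0
--
--     for char in total_vec:
--         if mre_ptr >= len(mre_binding_seq) or mir_ptr >= len(mirna_binding_seq):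
--             break
--
--         if char == '1':
--             paired_mre.append(mre_binding_seq[mre_ptr])
--             paired_mir.append(mirna_binding_seq[mir_ptr])
--             mirna_positions_in_full.append(mir_ptr + mirna_binding_start)
--
--         if char in '123De':
--             mre_ptr += 1
--         if char in '124Dd':
--             mir_ptr += 1
--
--     return "".join(paired_mre), "".join(paired_mir), mirna_positions_in_full
-- ===== SOURCE B (Python) =====
-- def get_paired_bases_with_positions(total_vec, mre_binding_seq, mirna_binding_seq,
--                                      mre_binding_start, mirna_binding_start):
--     # Prescan: record the (mre_ptr, mir_ptr) pair BEFORE each step, then find the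
--     # cutoff where either pointer first reaches the end, then gather the '1' hits.
--     states = []
--     e = m = 0
--     for ch in total_vec:
--         states.append((e, m))
--         e += ch in '123De'
--         m += ch in '124Dd'
--     cut = len(total_vec)
--     for i, (e, m) in enumerate(states):
--         if e >= len(mre_binding_seq) or m >= len(mirna_binding_seq):
--             cut = i
--             break
--     paired = [(mre_binding_seq[e], mirna_binding_seq[m], m + mirna_binding_start)
--               for ch, (e, m) in zip(total_vec[:cut], states[:cut]) if ch == '1']
--     return ("".join(p[0] for p in paired),
--             "".join(p[1] for p in paired),
--             [p[2] for p in paired])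
-- ===== Notes on version B (the rewrite author's own statement) =====
-- stated objective: alternative
-- what changed: Replaces A's single fused loop (two pointers advanced, tested and indexed in one pass with a break) by a prescan that records the pointer pair before every step, a separate cutoff search for the first position where either pointer reaches its sequence end, and a comprehension-style gather over the '1' positions before the cutoff.
import Mathlib
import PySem

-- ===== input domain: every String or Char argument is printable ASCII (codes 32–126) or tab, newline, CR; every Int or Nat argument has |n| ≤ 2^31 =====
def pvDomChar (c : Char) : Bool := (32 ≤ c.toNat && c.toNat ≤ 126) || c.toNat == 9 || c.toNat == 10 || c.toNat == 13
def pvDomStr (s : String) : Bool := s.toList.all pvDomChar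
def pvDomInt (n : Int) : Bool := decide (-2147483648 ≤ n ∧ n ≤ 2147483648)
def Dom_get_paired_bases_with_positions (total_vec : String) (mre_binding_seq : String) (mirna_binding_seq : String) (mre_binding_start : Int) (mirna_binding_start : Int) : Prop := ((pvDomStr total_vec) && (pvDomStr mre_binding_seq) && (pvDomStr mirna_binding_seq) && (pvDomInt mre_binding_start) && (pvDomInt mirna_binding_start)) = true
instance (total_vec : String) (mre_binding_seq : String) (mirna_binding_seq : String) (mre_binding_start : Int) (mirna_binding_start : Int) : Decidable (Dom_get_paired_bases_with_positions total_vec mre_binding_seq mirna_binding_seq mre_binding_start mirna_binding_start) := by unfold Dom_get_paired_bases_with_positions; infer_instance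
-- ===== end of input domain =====

-- B replaces A's single fused pointer loop by a prescan of pointer states, a cutoff
-- search and a comprehension-style gather (alternative decomposition, same cost).

-- characters on which the mre pointer advances ('123De') / the mir pointer advances ('124Dd')
def pvESet : List Char := ['1', '2', '3', 'D', 'e']
def pvMSet : List Char := ['1', '2', '4', 'D', 'd']

-- ===== PORT A =====
-- A's loop: one pass, two pointers, break when either pointer reaches its end.
def pvGoA (mre mir : List Char) (mirStart : Int) : List Char → Nat → Nat → List Char × List Char × List Int
  | [], _, _ => ([], [], [])
  | c :: rest, e, m =>
    if e ≥ mre.length ∨ m ≥ mir.length then ([], [], [])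
    else
      let e' := if c ∈ pvESet then e + 1 else e
      let m' := if c ∈ pvMSet then m + 1 else m
      let tail := pvGoA mre mir mirStart rest e' m'
      if c = '1' then
        (mre.getD e ' ' :: tail.1, mir.getD m ' ' :: tail.2.1, ((m : Int) + mirStart) :: tail.2.2)
      else tail

def get_paired_bases_with_positions (total_vec : String) (mre_binding_seq : String) (mirna_binding_seq : String) (mre_binding_start : Int) (mirna_binding_start : Int) : String × String × List Int :=
  let r := pvGoA mre_binding_seq.toList mirna_binding_seq.toList mirna_binding_start total_vec.toList 0 0
  (String.mk r.1, String.mk r.2.1, r.2.2)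

-- ===== PORT B =====
-- B's prescan step: the pointer pair after consuming one character.
def pvStepB (em : Nat × Nat) (c : Char) : Nat × Nat :=
  (em.1 + (if c ∈ pvESet then 1 else 0), em.2 + (if c ∈ pvMSet then 1 else 0))

def get_paired_bases_with_positions_alt (total_vec : String) (mre_binding_seq : String) (mirna_binding_seq : String) (mre_binding_start : Int) (mirna_binding_start : Int) : String × String × List Int :=
  let tv := total_vec.toList
  let mre := mre_binding_seq.toList
  let mir := mirna_binding_seq.toList
  let states := (tv.scanl pvStepB (0, 0)).dropLast
  let cut := states.findIdx (fun em => decide (mre.length ≤ em.1 ∨ mir.length ≤ em.2))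
  let paired := ((tv.take cut).zip (states.take cut)).filterMap
    (fun p => if p.1 = '1' then some (mre.getD p.2.1 ' ', mir.getD p.2.2 ' ', (p.2.2 : Int) + mirna_binding_start) else none)
  (String.mk (paired.map (·.1)), String.mk (paired.map (·.2.1)), paired.map (·.2.2))

-- ===== PRECONDITION & SPEC =====
def Spec_get_paired_bases_with_positions (total_vec : String) (mre_binding_seq : String) (mirna_binding_seq : String) (mre_binding_start : Int) (mirna_binding_start : Int) (out : String × String × List Int) : Prop := out = get_paired_bases_with_positions_alt total_vec mre_binding_seq mirna_binding_seq mre_binding_start mirna_binding_start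
instance (total_vec : String) (mre_binding_seq : String) (mirna_binding_seq : String) (mre_binding_start : Int) (mirna_binding_start : Int) (out : String × String × List Int) : Decidable (Spec_get_paired_bases_with_positions total_vec mre_binding_seq mirna_binding_seq mre_binding_start mirna_binding_start out) := by unfold Spec_get_paired_bases_with_positions; infer_instance

-- ===== CLAIM (what is proved, stated in full; the proofs are below) =====
def Claim_equal_get_paired_bases_with_positions : Prop := ∀ (total_vec : String) (mre_binding_seq : String) (mirna_binding_seq : String) (mre_binding_start : Int) (mirna_binding_start : Int), Dom_get_paired_bases_with_positions total_vec mre_binding_seq mirna_binding_seq mre_binding_start mirna_binding_start → Spec_get_paired_bases_with_positions total_vec mre_binding_seq mirna_binding_seq mre_binding_start mirna_binding_start (get_paired_bases_with_positions total_vec mre_binding_seq mirna_binding_seq mre_binding_start mirna_binding_start)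

-- ===== LEMMAS AND PROOFS =====

-- B's pipeline, generalized to an arbitrary starting pointer pair (proof helper).
def pvGB (mre mir : List Char) (ms : Int) (tv : List Char) (e m : Nat) : List (Char × Char × Int) :=
  let states := (tv.scanl pvStepB (e, m)).dropLast
  let cut := states.findIdx (fun em => decide (mre.length ≤ em.1 ∨ mir.length ≤ em.2))
  ((tv.take cut).zip (states.take cut)).filterMap
    (fun p => if p.1 = '1' then some (mre.getD p.2.1 ' ', mir.getD p.2.2 ' ', (p.2.2 : Int) + ms) else none)

theorem pvGB_nil (mre mir : List Char) (ms : Int) (e m : Nat) : pvGB mre mir ms [] e m = [] := rfl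

theorem pvGB_cons (mre mir : List Char) (ms : Int) (c : Char) (rest : List Char) (e m : Nat) :
    pvGB mre mir ms (c :: rest) e m =
      if mre.length ≤ e ∨ mir.length ≤ m then []
      else
        (if c = '1' then
          (mre.getD e ' ', mir.getD m ' ', (m : Int) + ms) ::
            pvGB mre mir ms rest (pvStepB (e, m) c).1 (pvStepB (e, m) c).2
        else pvGB mre mir ms rest (pvStepB (e, m) c).1 (pvStepB (e, m) c).2) := by
  have hne : rest.scanl pvStepB (pvStepB (e, m) c) ≠ [] := by
    intro h
    have := congrArg List.length h
    simp [List.length_scanl] at this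
  unfold pvGB
  simp only [List.scanl_cons, List.dropLast_cons_of_ne_nil hne, List.findIdx_cons]
  by_cases hb : mre.length ≤ e ∨ mir.length ≤ m
  · simp [hb]
  · simp only [hb, decide_false, Bool.cond_false, if_false]
    simp only [List.take_succ_cons, List.zip_cons_cons, List.filterMap_cons]
    by_cases h1 : c = '1' <;> simp [h1, pvGB]

theorem pvGoA_eq_pvGB (mre mir : List Char) (ms : Int) (tv : List Char) (e m : Nat) :
    pvGoA mre mir ms tv e m =
      ((pvGB mre mir ms tv e m).map (·.1),
       (pvGB mre mir ms tv e m).map (·.2.1),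
       (pvGB mre mir ms tv e m).map (·.2.2)) := by
  induction tv generalizing e m with
  | nil => simp [pvGoA, pvGB_nil]
  | cons c rest ih =>
    rw [pvGB_cons]
    by_cases hb : e ≥ mre.length ∨ m ≥ mir.length
    · simp [pvGoA, hb]
    · rw [pvGoA, if_neg hb, if_neg hb]
      by_cases h1 : c = '1'
      · subst h1
        simp [ih, pvStepB, show ('1' : Char) ∈ pvESet from by decide,
          show ('1' : Char) ∈ pvMSet from by decide]
      · by_cases hE : c ∈ pvESet <;> by_cases hM : c ∈ pvMSet <;>
          simp [h1, hE, hM, ih, pvStepB]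

theorem alt_eq_pvGB (total_vec mre_binding_seq mirna_binding_seq : String) (mre_binding_start mirna_binding_start : Int) :
    get_paired_bases_with_positions_alt total_vec mre_binding_seq mirna_binding_seq mre_binding_start mirna_binding_start =
      ((pvGB mre_binding_seq.toList mirna_binding_seq.toList mirna_binding_start total_vec.toList 0 0).map (·.1) |> String.mk,
       (pvGB mre_binding_seq.toList mirna_binding_seq.toList mirna_binding_start total_vec.toList 0 0).map (·.2.1) |> String.mk,
       (pvGB mre_binding_seq.toList mirna_binding_seq.toList mirna_binding_start total_vec.toList 0 0).map (·.2.2)) := rfl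

-- ===== VERDICT (by name: the statement is the Claim_ definition above) =====
theorem get_paired_bases_with_positions_spec : Claim_equal_get_paired_bases_with_positions := by
  intro tv mre mir a b _
  unfold Spec_get_paired_bases_with_positions get_paired_bases_with_positions
  rw [alt_eq_pvGB, pvGoA_eq_pvGB]
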